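-- pv_equiv track=rewrite | github.com/K1Green/comfyui-metadata-nodes | ffpy_exiftool_node.py | _format_human_readable
-- ===== SOURCE A (Python) =====
-- from typing import Optional, Dict, Any, List
--
-- def _format_human_readable(metadata: Dict[str, Any]) -> str:
--     """Format metadata as human-readable text."""
--     lines = []
--     lines.append("=" * 60)
--     lines.append("EXIFTOOL METADATA REPORT")
--     lines.append("=" * 60)
--     lines.append("")
--
--     # Group by prefix (e.g., EXIF:, XMP:, IPTC:)
--     groups = {}
--     for key, value in metadata.items():
--         if ":" in key:
--             group, tag = key.split(":", 1)
--             if group not in groups: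
--                 groups[group] = {}
--             groups[group][tag] = value
--         else:
--             if "Other" not in groups:
--                 groups["Other"] = {}
--             groups["Other"][key] = value
--
--     # Print by group
--     for group in sorted(groups.keys()):
--         lines.append(f"[{group}]")
--         lines.append("-" * 60)
--         for tag, value in sorted(groups[group].items()):
--             value_str = str(value)
--             if len(value_str) > 100:
--                 value_str = value_str[:100] + "..."
--             lines.append(f"{tag:30} : {value_str}")
--         lines.append("")
--
--     lines.append("=" * 60)
--     lines.append(f"Total: {len(metadata)} metadata fields")
--     lines.append("=" * 60)
--
--     return "\n".join(lines)
-- ===== SOURCE B (Python) =====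
-- def _format_human_readable(metadata):
--     """Format metadata as human-readable text."""
--     # One flat dict keyed by (group, tag); later entries overwrite earlier ones.
--     flat = {}
--     for key, value in metadata.items():
--         if ":" in key:
--             group, tag = key.split(":", 1)
--         else:
--             group, tag = "Other", key
--         flat[(group, tag)] = value
--
--     lines = ["=" * 60, "EXIFTOOL METADATA REPORT", "=" * 60, ""]
--     prev = None
--     # One pass over the items sorted by (group, tag): tuple order gives
--     # group-major, tag-minor order, so a group header is emitted whenever
--     # the group component changes.
--     for (group, tag), value in sorted(flat.items(), key=lambda kv: kv[0]):
--         if prev != group: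
--             if prev is not None:
--                 lines.append("")
--             lines.append(f"[{group}]")
--             lines.append("-" * 60)
--             prev = group
--         value_str = str(value)
--         if len(value_str) > 100:
--             value_str = value_str[:100] + "..."
--         lines.append(f"{tag:30} : {value_str}")
--     if prev is not None:
--         lines.append("")
--
--     lines.append("=" * 60)
--     lines.append(f"Total: {len(metadata)} metadata fields")
--     lines.append("=" * 60)
--     return "\n".join(lines)
-- ===== Notes on version B (the rewrite author's own statement) =====
-- stated objective: alternative
-- what changed: B replaces A's nested dict-of-dicts with per-group sorts inside a two-level output loop by one flat dict keyed by (group, tag) pairs, one global sort of its items, and a single pass that emits the group header and separator whenever the group component changes.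
import Mathlib
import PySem

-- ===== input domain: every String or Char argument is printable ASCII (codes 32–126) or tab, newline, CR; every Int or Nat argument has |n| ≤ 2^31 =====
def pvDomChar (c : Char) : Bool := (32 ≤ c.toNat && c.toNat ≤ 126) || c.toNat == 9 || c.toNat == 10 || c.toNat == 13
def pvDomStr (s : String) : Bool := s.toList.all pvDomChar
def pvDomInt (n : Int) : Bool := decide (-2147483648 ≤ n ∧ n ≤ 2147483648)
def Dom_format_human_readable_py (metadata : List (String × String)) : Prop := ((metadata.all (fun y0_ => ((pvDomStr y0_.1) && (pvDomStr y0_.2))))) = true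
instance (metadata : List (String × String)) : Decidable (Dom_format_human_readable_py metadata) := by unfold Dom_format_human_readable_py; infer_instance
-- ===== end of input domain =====

-- B replaces A's nested dict-of-dicts + per-group sorts + two-level output loop by a flat
-- (group, tag)-keyed dict, one global sort, and a single pass emitting headers on group change
-- (alternative decomposition, same cost).

-- ===== PORT A =====
-- shared rendering pieces (identical code in both Pythons): "="*60, "-"*60, the
-- 100-char truncation and the f"{tag:30} : {value_str}" line (pad-to-30 ported by hand, exact)
def pvRule : String := String.ofList (List.replicate 60 '=')
def pvDash : String := String.ofList (List.replicate 60 '-')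
def pvFmtLine (tag v : String) : String :=
  let vs := if 100 < PySem.Str.len v then PySem.Str.slice v none (some 100) ++ "..." else v
  String.ofList (tag.toList ++ List.replicate (30 - tag.toList.length) ' ') ++ " : " ++ vs

-- the grouping step of A's first loop: groups[group][tag] = value with setdefault-{} semantics
def pvStepA (gs : PySem.Dict String (PySem.Dict String String)) (kv : String × String) :
    PySem.Dict String (PySem.Dict String String) :=
  if PySem.Str.isIn ":" kv.1 then
    let parts := (PySem.Str.splitMax? kv.1 ":" 1).getD []
    PySem.Dict.modify gs (parts.getD 0 "") PySem.Dict.empty (fun m => m.insert (parts.getD 1 "") kv.2)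
  else
    PySem.Dict.modify gs "Other" PySem.Dict.empty (fun m => m.insert kv.1 kv.2)

-- body of A's "for group in sorted(groups.keys())" loop
def pvBodyA (groups : PySem.Dict String (PySem.Dict String String))
    (ls : List String) (g : String) : List String :=
  let ls := ls ++ ["[" ++ g ++ "]"]
  let ls := ls ++ [pvDash]
  let ls := (PySem.List.sorted (groups.getD g PySem.Dict.empty).items (fun tv => toLex tv) false).foldl
      (fun ls2 tv => ls2 ++ [pvFmtLine tv.1 tv.2]) ls
  ls ++ [""]

def format_human_readable_py (metadata : List (String × String)) : String :=
  let lines : List String := [pvRule, "EXIFTOOL METADATA REPORT", pvRule, ""]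
  let groups := metadata.foldl pvStepA PySem.Dict.empty
  let lines := (PySem.List.sorted groups.keys (fun g => g) false).foldl (pvBodyA groups) lines
  let lines := lines ++ [pvRule, "Total: " ++ PySem.Int.toStr (metadata.length : Int) ++ " metadata fields", pvRule]
  PySem.Str.join "\n" lines

-- ===== PORT B =====
-- flat[(group, tag)] = value
def pvStepB (d : PySem.Dict (String × String) String) (kv : String × String) :
    PySem.Dict (String × String) String :=
  if PySem.Str.isIn ":" kv.1 then
    let parts := (PySem.Str.splitMax? kv.1 ":" 1).getD []
    d.insert (parts.getD 0 "", parts.getD 1 "") kv.2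
  else
    d.insert ("Other", kv.1) kv.2

-- body of B's single pass: emit header/separator when the group component changes
def pvEmit (st : List String × Option String) (p : (String × String) × String) :
    List String × Option String :=
  if st.2 ≠ some p.1.1 then
    let ls := (if st.2 = none then st.1 else st.1 ++ [""]) ++ ["[" ++ p.1.1 ++ "]"] ++ [pvDash]
    (ls ++ [pvFmtLine p.1.2 p.2], some p.1.1)
  else
    (st.1 ++ [pvFmtLine p.1.2 p.2], st.2)

def format_human_readable_py_alt (metadata : List (String × String)) : String :=
  let flat := metadata.foldl pvStepB PySem.Dict.empty
  let lines : List String := [pvRule, "EXIFTOOL METADATA REPORT", pvRule, ""]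
  let st := (PySem.List.sorted flat.items (fun p => toLex p.1) false).foldl pvEmit (lines, (none : Option String))
  let lines := if st.2 = none then st.1 else st.1 ++ [""]
  let lines := lines ++ [pvRule, "Total: " ++ PySem.Int.toStr (metadata.length : Int) ++ " metadata fields", pvRule]
  PySem.Str.join "\n" lines

-- ===== PRECONDITION & SPEC =====
def Spec_format_human_readable_py (metadata : List (String × String)) (out : String) : Prop := out = format_human_readable_py_alt metadata
instance (metadata : List (String × String)) (out : String) : Decidable (Spec_format_human_readable_py metadata out) := by unfold Spec_format_human_readable_py; infer_instance

-- ===== CLAIM (what is proved, stated in full; the proofs are below) =====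
def Claim_equal_format_human_readable_py : Prop := ∀ (metadata : List (String × String)), Dom_format_human_readable_py metadata → Spec_format_human_readable_py metadata (format_human_readable_py metadata)

-- ===== LEMMAS AND PROOFS =====

def pvInv (gs : PySem.Dict String (PySem.Dict String String))
    (d : PySem.Dict (String × String) String) : Prop :=
  (∀ g t, d.get? (g, t) = (gs.getD g PySem.Dict.empty).get? t) ∧
  gs.keys.Nodup ∧
  (∀ g, (gs.getD g PySem.Dict.empty).keys.Nodup) ∧
  (∀ g, gs.contains g = true → (gs.getD g PySem.Dict.empty).items ≠ []) ∧
  d.keys.Nodup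
def pvKeyOf (k : String) : String × String :=
  if PySem.Str.isIn ":" k then
    let parts := (PySem.Str.splitMax? k ":" 1).getD []
    (parts.getD 0 "", parts.getD 1 "")
  else ("Other", k)
theorem pvStepA_eq (gs : PySem.Dict String (PySem.Dict String String)) (kv : String × String) :
    pvStepA gs kv = PySem.Dict.modify gs (pvKeyOf kv.1).1 PySem.Dict.empty
      (fun m => m.insert (pvKeyOf kv.1).2 kv.2) := by
  unfold pvStepA pvKeyOf; split <;> rfl
theorem pvStepB_eq (d : PySem.Dict (String × String) String) (kv : String × String) :
    pvStepB d kv = d.insert (pvKeyOf kv.1) kv.2 := by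
  unfold pvStepB pvKeyOf; split <;> rfl
theorem pv_insert_items_ne_nil {κ ν : Type} [BEq κ] [LawfulBEq κ]
    (d : PySem.Dict κ ν) (k : κ) (v : ν) : (d.insert k v).items ≠ [] := by
  rw [PySem.Dict.items_insert]
  split
  · rename_i hc
    have hk : k ∈ d.keys := (PySem.Dict.contains_iff_mem_keys d k).mp hc
    simp only [PySem.Dict.keys, List.mem_map] at hk
    obtain ⟨p, hp, -⟩ := hk
    simp only [ne_eq, List.map_eq_nil_iff]
    exact List.ne_nil_of_mem hp
  · simp
theorem pvInv_step (gs : PySem.Dict String (PySem.Dict String String))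
    (d : PySem.Dict (String × String) String) (kv : String × String)
    (h : pvInv gs d) : pvInv (pvStepA gs kv) (pvStepB d kv) := by
  obtain ⟨h1, h2, h3, h4, h5⟩ := h
  rw [pvStepA_eq, pvStepB_eq]
  rcases hkey : pvKeyOf kv.1 with ⟨g0, t0⟩
  dsimp only
  refine ⟨?_, ?_, ?_, ?_, ?_⟩
  · intro g t
    rw [PySem.Dict.get?_insert, PySem.Dict.getD_modify]
    by_cases hg : g = g0
    · subst hg
      rw [if_pos rfl, PySem.Dict.get?_insert]
      by_cases ht : t = t0
      · subst ht; simp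
      · rw [if_neg ht, if_neg (by simp [Prod.ext_iff, ht]), h1]
    · rw [if_neg hg, if_neg (by simp [Prod.ext_iff, hg]), h1]
  · rw [PySem.Dict.keys_modify]
    exact PySem.Dict.nodup_keys_insert _ _ _ h2
  · intro g
    rw [PySem.Dict.getD_modify]
    by_cases hg : g = g0
    · rw [if_pos hg]; exact PySem.Dict.nodup_keys_insert _ _ _ (h3 g0)
    · rw [if_neg hg]; exact h3 g
  · intro g hc
    rw [PySem.Dict.getD_modify]
    by_cases hg : g = g0
    · rw [if_pos hg]; exact pv_insert_items_ne_nil _ _ _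
    · rw [if_neg hg]
      rw [PySem.Dict.contains_modify] at hc
      have hc' : gs.contains g = true := by
        rcases (Bool.or_eq_true _ _).mp hc with h' | h'
        · exact absurd (by simpa using h') hg
        · exact h'
      exact h4 g hc'
  · exact PySem.Dict.nodup_keys_insert _ _ _ h5

def pvBlocks (gs : PySem.Dict String (PySem.Dict String String)) : List ((String × String) × String) :=
  (PySem.List.sorted gs.keys (fun g => g) false).flatMap (fun g =>
    (PySem.List.sorted (gs.getD g PySem.Dict.empty).items (fun tv => toLex tv) false).map
      (fun tv => ((g, tv.1), tv.2)))

theorem pv_blocks_pairwise (gs : PySem.Dict String (PySem.Dict String String))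
    (h2 : gs.keys.Nodup) (h3 : ∀ g, (gs.getD g PySem.Dict.empty).keys.Nodup) :
    (pvBlocks gs).Pairwise (fun a b => toLex a.1 < toLex b.1) := by
  unfold pvBlocks
  rw [List.pairwise_flatMap]
  constructor
  · intro g hg
    rw [List.pairwise_map]
    have hle := PySem.List.sorted_pairwise (gs.getD g PySem.Dict.empty).items (fun tv => toLex tv)
    have hnd : ((PySem.List.sorted (gs.getD g PySem.Dict.empty).items (fun tv => toLex tv) false).map Prod.fst).Nodup := by
      have hperm := (PySem.List.sorted_perm (gs.getD g PySem.Dict.empty).items (fun tv => toLex tv) false).map Prod.fst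
      exact hperm.nodup_iff.mpr (h3 g)
    have hne : (PySem.List.sorted (gs.getD g PySem.Dict.empty).items (fun tv => toLex tv) false).Pairwise
        (fun a b => a.1 ≠ b.1) := List.pairwise_map.mp hnd
    refine (hle.and hne).imp ?_
    rintro a b ⟨hab, hfst⟩
    rcases Prod.Lex.le_iff.mp hab with h' | ⟨h', -⟩
    · exact Prod.Lex.lt_iff.mpr (Or.inr ⟨rfl, h'⟩)
    · exact absurd h' hfst
  · have hlt : (PySem.List.sorted gs.keys (fun g => g) false).Pairwise (· < ·) := by
      have hle := PySem.List.sorted_pairwise gs.keys (fun g => g)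
      have hnd : (PySem.List.sorted gs.keys (fun g => g) false).Nodup :=
        (PySem.List.sorted_perm gs.keys (fun g => g) false).nodup_iff.mpr h2
      exact (hle.and hnd).imp (fun ⟨hab, hne⟩ => lt_of_le_of_ne hab hne)
    refine hlt.imp ?_
    intro g1 g2 h12 x hx y hy
    simp only [List.mem_map] at hx hy
    obtain ⟨tv1, -, rfl⟩ := hx
    obtain ⟨tv2, -, rfl⟩ := hy
    exact Prod.Lex.lt_iff.mpr (Or.inl h12)

theorem pv_sorted_flat_eq (gs : PySem.Dict String (PySem.Dict String String))
    (d : PySem.Dict (String × String) String) (h : pvInv gs d) :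
    PySem.List.sorted d.items (fun p => toLex p.1) false = pvBlocks gs := by
  obtain ⟨h1, h2, h3, h4, h5⟩ := h
  apply PySem.List.sorted_eq_of_perm_of_pairwise_lt
  · -- (pvBlocks gs).Perm d.items
    have nd1 : (pvBlocks gs).Nodup :=
      (pv_blocks_pairwise gs h2 h3).imp (fun hab => by
        intro hEq; subst hEq; exact lt_irrefl _ hab)
    have nd2 : d.items.Nodup := List.Nodup.of_map Prod.fst h5
    rw [List.perm_ext_iff_of_nodup nd1 nd2]
    intro p
    have hmemd : p ∈ d.items ↔ d.get? p.1 = some p.2 := by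
      rw [← PySem.Dict.get?_eq_some_iff_mem_items _ _ _ h5]
    rw [hmemd]
    have h1' : d.get? p.1 = (gs.getD p.1.1 PySem.Dict.empty).get? p.1.2 := h1 p.1.1 p.1.2
    unfold pvBlocks
    simp only [List.mem_flatMap, List.mem_map, PySem.List.mem_sorted]
    constructor
    · rintro ⟨g, hg, tv, htv, rfl⟩
      rw [h1 g tv.1]
      exact (PySem.Dict.get?_eq_some_iff_mem_items _ _ _ (h3 g)).mpr htv
    · intro hp
      rw [h1'] at hp
      have hcont : gs.contains p.1.1 = true := by
        by_contra hc
        rw [PySem.Dict.getD_of_not_contains _ _ (Bool.not_eq_true _ ▸ hc)] at hp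
        rw [PySem.Dict.get?_empty] at hp
        simp at hp
      refine ⟨p.1.1, (PySem.Dict.contains_iff_mem_keys _ _).mp hcont, (p.1.2, p.2), ?_, by simp⟩
      exact (PySem.Dict.get?_eq_some_iff_mem_items _ _ _ (h3 p.1.1)).mp hp
  · exact pv_blocks_pairwise gs h2 h3

def pvFin (st : List String × Option String) : List String :=
  if st.2 = none then st.1 else st.1 ++ [""]

theorem pv_emit_run (items : List (String × String)) (g : String) (ls : List String) :
    (items.map (fun tv => ((g, tv.1), tv.2))).foldl pvEmit (ls, some g)
      = (ls ++ items.map (fun tv => pvFmtLine tv.1 tv.2), some g) := by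
  induction items generalizing ls with
  | nil => simp
  | cons tv rest ih =>
    simp only [List.map_cons, List.foldl_cons]
    rw [show pvEmit (ls, some g) ((g, tv.1), tv.2) = (ls ++ [pvFmtLine tv.1 tv.2], some g) by
      simp [pvEmit]]
    rw [ih]
    simp

theorem pv_emit_groups (L : List (String × List (String × String))) (ls : List String)
    (prev : Option String)
    (hne : ∀ gi ∈ L, gi.2 ≠ []) (hprev : ∀ gi ∈ L, prev ≠ some gi.1)
    (hnd : (L.map Prod.fst).Nodup) :
    pvFin
        ((L.flatMap (fun gi => gi.2.map (fun tv => ((gi.1, tv.1), tv.2)))).foldl pvEmit (ls, prev))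
      = (if prev = none then ls else ls ++ [""]) ++
        L.flatMap (fun gi => ["[" ++ gi.1 ++ "]"] ++ [pvDash] ++
          gi.2.map (fun tv => pvFmtLine tv.1 tv.2) ++ [""]) := by
  induction L generalizing ls prev with
  | nil => simp [pvFin]
  | cons gi L' ih =>
    obtain ⟨g, its⟩ := gi
    rcases its with _ | ⟨tv, rest⟩
    · exact absurd rfl (hne (g, []) (by simp))
    have hpg : prev ≠ some g := hprev (g, tv :: rest) (by simp)
    simp only [List.flatMap_cons, List.foldl_append, List.map_cons, List.foldl_cons]
    rw [show pvEmit (ls, prev) ((g, tv.1), tv.2)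
        = ((if prev = none then ls else ls ++ [""]) ++ ["[" ++ g ++ "]"] ++ [pvDash]
            ++ [pvFmtLine tv.1 tv.2], some g) by
      simp [pvEmit, hpg]]
    rw [pv_emit_run]
    rw [ih _ (some g)
      (fun x hx => hne x (by simp [hx]))
      (fun x hx => by
        simp only [List.map_cons, List.nodup_cons] at hnd
        intro hcon
        refine hnd.1 ?_
        rw [Option.some.inj hcon]
        exact List.mem_map_of_mem hx)
      (by simp only [List.map_cons, List.nodup_cons] at hnd; exact hnd.2)]
    simp [List.append_assoc]

theorem pvInv_foldl (l : List (String × String)) (gs : PySem.Dict String (PySem.Dict String String))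
    (d : PySem.Dict (String × String) String) (h : pvInv gs d) :
    pvInv (l.foldl pvStepA gs) (l.foldl pvStepB d) := by
  induction l generalizing gs d with
  | nil => exact h
  | cons kv t ih => exact ih _ _ (pvInv_step _ _ _ h)

theorem pvInv_init : pvInv PySem.Dict.empty PySem.Dict.empty := by
  refine ⟨?_, ?_, ?_, ?_, ?_⟩
  · intro g t
    rw [PySem.Dict.get?_empty, PySem.Dict.getD_empty, PySem.Dict.get?_empty]
  · simp [PySem.Dict.keys_empty]
  · intro g; rw [PySem.Dict.getD_empty]; simp [PySem.Dict.keys_empty]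
  · intro g hc; rw [PySem.Dict.contains_empty] at hc; exact absurd hc (by simp)
  · simp [PySem.Dict.keys_empty]

theorem pv_foldlA_eq (G : PySem.Dict String (PySem.Dict String String)) (gs : List String)
    (ls : List String) :
    gs.foldl (pvBodyA G) ls = ls ++ gs.flatMap (fun g =>
      ["[" ++ g ++ "]"] ++ [pvDash] ++
      (PySem.List.sorted (G.getD g PySem.Dict.empty).items (fun tv => toLex tv) false).map
        (fun tv => pvFmtLine tv.1 tv.2) ++ [""]) := by
  induction gs generalizing ls with
  | nil => simp
  | cons g t ih =>
    simp only [List.foldl_cons, List.flatMap_cons]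
    rw [show pvBodyA G ls g = ls ++ (["[" ++ g ++ "]"] ++ [pvDash] ++
        (PySem.List.sorted (G.getD g PySem.Dict.empty).items (fun tv => toLex tv) false).map
          (fun tv => pvFmtLine tv.1 tv.2) ++ [""]) by
      unfold pvBodyA
      dsimp only
      rw [PySem.List.foldl_append_singleton_eq_map]
      simp [List.append_assoc]]
    rw [ih]
    simp [List.append_assoc]

-- ===== VERDICT (by name: the statement is the Claim_ definition above) =====
theorem format_human_readable_py_spec : Claim_equal_format_human_readable_py := by
  intro metadata _
  unfold Spec_format_human_readable_py format_human_readable_py format_human_readable_py_alt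
  dsimp only
  have hInv := pvInv_foldl metadata PySem.Dict.empty PySem.Dict.empty pvInv_init
  set G := metadata.foldl pvStepA PySem.Dict.empty with hG
  set F := metadata.foldl pvStepB PySem.Dict.empty with hF
  obtain ⟨-, h2, h3, h4, -⟩ := hInv
  -- B's sorted flat items are A's blocks
  rw [pv_sorted_flat_eq G F (hG ▸ hF ▸ pvInv_foldl metadata PySem.Dict.empty PySem.Dict.empty pvInv_init)]
  -- rewrite A's two-level loop into header ++ flatMap of group blocks
  rw [pv_foldlA_eq]
  -- rewrite B's single pass via pv_emit_groups over L = sorted groups with their sorted items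
  have hL := pv_emit_groups
      ((PySem.List.sorted G.keys (fun g => g) false).map (fun g =>
        (g, PySem.List.sorted (G.getD g PySem.Dict.empty).items (fun tv => toLex tv) false)))
      [pvRule, "EXIFTOOL METADATA REPORT", pvRule, ""] none
      (by
        intro gi hgi
        simp only [List.mem_map] at hgi
        obtain ⟨g, hg, rfl⟩ := hgi
        rw [ne_eq, PySem.List.sorted_eq_nil_iff]
        have hgk : g ∈ G.keys := (PySem.List.mem_sorted _ _ _ _).mp hg
        exact h4 g ((PySem.Dict.contains_iff_mem_keys _ _).mpr hgk))
      (by intro gi hgi h; simp at h)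
      (by
        rw [List.map_map]
        have : ((fun gi => gi.1) ∘ fun g =>
            (g, PySem.List.sorted (G.getD g PySem.Dict.empty).items (fun tv => toLex tv) false))
            = fun g => g := rfl
        rw [show (Prod.fst ∘ fun g =>
            (g, PySem.List.sorted (G.getD g PySem.Dict.empty).items (fun tv => toLex tv) false))
            = id by rfl, List.map_id]
        exact (PySem.List.sorted_perm G.keys (fun g => g) false).nodup_iff.mpr h2)
  simp only [List.flatMap_map, pvFin, ite_true] at hL
  unfold pvBlocks
  rw [hL]
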